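-- pv_equiv track=rewrite | github.com/francisvac/daily-plan | email_feedback_processor.py | update_feedback_section
-- ===== SOURCE A (Python) =====
-- def update_feedback_section(content, section_header, feedback_items):
--     """Update a specific feedback section"""
--     lines = content.split('\n')
--     new_lines = []
--     in_section = False
--     feedback_added = False
--
--     for i, line in enumerate(lines):
--         if section_header in line:
--             in_section = True
--             new_lines.append(line)
--             continue
--
--         if in_section and line.startswith('###') and section_header not in line:
--             in_section = False
--             new_lines.append(line)
--             continue
--
--         if in_section and not feedback_added:
--             if line.strip().startswith('-') and 'TBD' in line:
--                 # Replace TBD with actual feedback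
--                 if feedback_items:
--                     new_lines.append(f"- {feedback_items[0]}")
--                     if len(feedback_items) > 1:
--                         new_lines.append(f"- {feedback_items[1]}")
--                     if len(feedback_items) > 2:
--                         new_lines.append(f"- {feedback_items[2]}")
--                     feedback_added = True
--                     continue
--             elif not line.strip():
--                 new_lines.append(line)
--                 continue
--
--         new_lines.append(line)
--
--     return '\n'.join(new_lines)
-- ===== SOURCE B (Python) =====
-- def _find_tbd_index(lines, section_header):
--     """Index of the first in-section '-' bullet containing 'TBD', else None."""
--     in_section = False
--     for idx, line in enumerate(lines):
--         if section_header in line: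
--             in_section = True
--         elif line.startswith('###'):
--             in_section = False
--         elif in_section and line.strip().startswith('-') and 'TBD' in line:
--             return idx
--     return None
--
--
-- def update_feedback_section(content, section_header, feedback_items):
--     """Update a specific feedback section"""
--     lines = content.split('\n')
--     idx = _find_tbd_index(lines, section_header) if feedback_items else None
--     if idx is None:
--         return '\n'.join(lines)
--     bullets = ['- ' + item for item in feedback_items[:3]]
--     return '\n'.join(lines[:idx] + bullets + lines[idx + 1:])
-- ===== Notes on version B (the rewrite author's own statement) =====
-- stated objective: simpler
-- what changed: Replaces A's single streaming pass that rebuilds every line while juggling in_section/feedback_added flags with a locate-then-splice decomposition: a small scan returns only the index of the first in-section TBD bullet, and the result is assembled by slicing lines[:idx] + bullets + lines[idx+1:].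
import Mathlib
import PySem

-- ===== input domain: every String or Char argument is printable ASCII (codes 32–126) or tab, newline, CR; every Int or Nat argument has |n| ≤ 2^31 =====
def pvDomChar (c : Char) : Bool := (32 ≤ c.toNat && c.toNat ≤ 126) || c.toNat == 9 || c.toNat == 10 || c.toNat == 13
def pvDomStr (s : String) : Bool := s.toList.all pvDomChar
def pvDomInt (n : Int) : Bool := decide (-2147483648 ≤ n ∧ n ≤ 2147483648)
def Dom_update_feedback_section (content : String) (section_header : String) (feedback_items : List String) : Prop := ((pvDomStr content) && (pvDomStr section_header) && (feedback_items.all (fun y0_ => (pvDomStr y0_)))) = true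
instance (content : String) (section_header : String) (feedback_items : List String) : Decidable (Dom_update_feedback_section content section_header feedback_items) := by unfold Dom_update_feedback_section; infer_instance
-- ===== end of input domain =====

-- B replaces A's streaming append/flag rebuild by a locate-then-splice decomposition
-- (find the index of the first in-section TBD bullet, then rebuild by slicing); objective: simpler.


-- ===== PORT A =====
-- content.split('\n'): sep is the non-empty "\n", so Python never raises; split? is some here.
def pvSplitNL (content : String) : List String :=
  (PySem.Str.split? content "\n").getD []

-- loop body of A's for-loop: state = (new_lines, in_section, feedback_added)
def pvStepA (section_header : String) (feedback_items : List String)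
    (st : List String × Bool × Bool) (line : String) : List String × Bool × Bool :=
  if PySem.Str.isIn section_header line then
    (st.1 ++ [line], true, st.2.2)
  else if st.2.1 && PySem.Str.startswith line "###" && !(PySem.Str.isIn section_header line) then
    (st.1 ++ [line], false, st.2.2)
  else if st.2.1 && !st.2.2 then
    if PySem.Str.startswith (PySem.Str.strip line) "-" && PySem.Str.isIn "TBD" line then
      match feedback_items with
      | [] => (st.1 ++ [line], st.2.1, st.2.2)      -- 'if feedback_items:' false: fall to bottom append
      | x0 :: _ =>
        let nl := st.1 ++ ["- " ++ x0]
        let nl := if 1 < feedback_items.length then nl ++ ["- " ++ PySem.List.pyGetD feedback_items 1 ""] else nl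
        let nl := if 2 < feedback_items.length then nl ++ ["- " ++ PySem.List.pyGetD feedback_items 2 ""] else nl
        (nl, st.2.1, true)
    else if PySem.Str.strip line == "" then
      (st.1 ++ [line], st.2.1, st.2.2)              -- 'elif not line.strip(): append; continue'
    else
      (st.1 ++ [line], st.2.1, st.2.2)              -- bottom append
  else
    (st.1 ++ [line], st.2.1, st.2.2)

def update_feedback_section (content : String) (section_header : String) (feedback_items : List String) : String :=
  let lines := pvSplitNL content
  let fin := lines.foldl (pvStepA section_header feedback_items) ([], false, false)
  PySem.Str.join "\n" fin.1

-- ===== PORT B =====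
-- _find_tbd_index: index of the first in-section '-' bullet containing 'TBD', else none
def pvFindTbdIdx (section_header : String) : List String → Bool → Option Nat
  | [], _ => none
  | line :: rest, in_section =>
    if PySem.Str.isIn section_header line then
      (pvFindTbdIdx section_header rest true).map (· + 1)
    else if PySem.Str.startswith line "###" then
      (pvFindTbdIdx section_header rest false).map (· + 1)
    else if in_section && PySem.Str.startswith (PySem.Str.strip line) "-" && PySem.Str.isIn "TBD" line then
      some 0
    else
      (pvFindTbdIdx section_header rest in_section).map (· + 1)

def update_feedback_section_alt (content : String) (section_header : String) (feedback_items : List String) : String :=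
  let lines := pvSplitNL content
  let idx? : Option Nat := if feedback_items.isEmpty then none else pvFindTbdIdx section_header lines false
  match idx? with
  | none => PySem.Str.join "\n" lines
  | some idx =>
    let bullets := (feedback_items.take 3).map (fun item => "- " ++ item)
    PySem.Str.join "\n" (lines.take idx ++ bullets ++ lines.drop (idx + 1))

-- ===== PRECONDITION & SPEC =====
def Spec_update_feedback_section (content : String) (section_header : String) (feedback_items : List String) (out : String) : Prop := out = update_feedback_section_alt content section_header feedback_items
instance (content : String) (section_header : String) (feedback_items : List String) (out : String) : Decidable (Spec_update_feedback_section content section_header feedback_items out) := by unfold Spec_update_feedback_section; infer_instance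

-- ===== CLAIM (what is proved, stated in full; the proofs are below) =====
def Claim_equal_update_feedback_section : Prop := ∀ (content : String) (section_header : String) (feedback_items : List String), Dom_update_feedback_section content section_header feedback_items → Spec_update_feedback_section content section_header feedback_items (update_feedback_section content section_header feedback_items)

-- ===== LEMMAS AND PROOFS =====

-- Once feedback_added is true, A's loop only appends the remaining lines.
theorem pvStepA_added (hdr : String) (items : List String) (lines : List String) (acc : List String) (ins : Bool) :
    (lines.foldl (pvStepA hdr items) (acc, ins, true)).1 = acc ++ lines := by
  induction lines generalizing acc ins with
  | nil => simp
  | cons l rest ih =>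
    simp only [List.foldl_cons, pvStepA, Bool.not_true, Bool.and_false, Bool.false_eq_true,
      if_false]
    split_ifs <;> simp [ih, List.append_assoc]

-- With no feedback items, A's loop appends every line unchanged.
theorem pvStepA_nil (hdr : String) (lines : List String) (acc : List String) (ins : Bool) :
    (lines.foldl (pvStepA hdr []) (acc, ins, false)).1 = acc ++ lines := by
  induction lines generalizing acc ins with
  | nil => simp
  | cons l rest ih =>
    simp only [List.foldl_cons, pvStepA]
    split_ifs <;> simp [ih, List.append_assoc]

-- At the replacement point A appends exactly B's bullet lines and sets feedback_added.
theorem pvStepA_candidate (hdr : String) (x0 : String) (xs : List String)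
    (acc : List String) (l : String)
    (h1 : PySem.Chars.isIn hdr.toList l.toList = false)
    (h2 : PySem.Chars.startswith l.toList ['#', '#', '#'] = false)
    (h4a : PySem.Chars.startswith (PySem.Chars.strip l.toList) ['-'] = true)
    (h4b : PySem.Chars.isIn ['T', 'B', 'D'] l.toList = true) :
    pvStepA hdr (x0 :: xs) (acc, true, false) l =
      (acc ++ ((x0 :: xs).take 3).map (fun item => "- " ++ item), true, true) := by
  match xs with
  | [] => simp [pvStepA, h1, h2, h4a, h4b]
  | [x1] =>
    have g1 : PySem.List.pyGetD [x0, x1] 1 "" = x1 := by simp [pysem]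
    simp [pvStepA, h1, h2, h4a, h4b, g1]
  | x1 :: x2 :: r =>
    have g1 : PySem.List.pyGetD (x0 :: x1 :: x2 :: r) 1 "" = x1 := by simp [pysem]
    have g2 : PySem.List.pyGetD (x0 :: x1 :: x2 :: r) 2 "" = x2 := by simp [pysem]
    simp [pvStepA, h1, h2, h4a, h4b, g1, g2, List.append_assoc]

-- Main invariant: with a non-empty items list, A's fold from (acc, ins, false) is
-- described by the index pvFindTbdIdx returns.
theorem pvStepA_main (hdr : String) (x0 : String) (xs : List String)
    (lines : List String) (acc : List String) (ins : Bool) :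
    (lines.foldl (pvStepA hdr (x0 :: xs)) (acc, ins, false)).1 =
      match pvFindTbdIdx hdr lines ins with
      | none => acc ++ lines
      | some idx =>
          acc ++ lines.take idx ++ ((x0 :: xs).take 3).map (fun item => "- " ++ item)
            ++ lines.drop (idx + 1) := by
  induction lines generalizing acc ins with
  | nil => simp [pvFindTbdIdx]
  | cons l rest ih =>
    rw [List.foldl_cons]
    by_cases h1 : PySem.Chars.isIn hdr.toList l.toList = true
    · have hstep : pvStepA hdr (x0 :: xs) (acc, ins, false) l = (acc ++ [l], true, false) := by
        simp [pvStepA, h1]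
      rw [hstep, ih]
      cases hfind : pvFindTbdIdx hdr rest true <;>
        simp [pvFindTbdIdx, h1, hfind, List.append_assoc]
    · rw [Bool.not_eq_true] at h1
      by_cases h2 : PySem.Chars.startswith l.toList ['#', '#', '#'] = true
      · have hstep : pvStepA hdr (x0 :: xs) (acc, ins, false) l = (acc ++ [l], false, false) := by
          cases ins <;> simp [pvStepA, h1, h2]
        rw [hstep, ih]
        cases hfind : pvFindTbdIdx hdr rest false <;>
          simp [pvFindTbdIdx, h1, h2, hfind, List.append_assoc]
      · rw [Bool.not_eq_true] at h2
        by_cases h4 : PySem.Chars.startswith (PySem.Chars.strip l.toList) ['-'] = true ∧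
            PySem.Chars.isIn ['T', 'B', 'D'] l.toList = true
        · obtain ⟨h4a, h4b⟩ := h4
          cases ins with
          | true =>
            rw [pvStepA_candidate hdr x0 xs acc l h1 h2 h4a h4b, pvStepA_added]
            simp [pvFindTbdIdx, h1, h2, h4a, h4b, List.append_assoc]
          | false =>
            have hstep : pvStepA hdr (x0 :: xs) (acc, false, false) l = (acc ++ [l], false, false) := by
              simp [pvStepA, h1, h2]
            rw [hstep, ih]
            cases hfind : pvFindTbdIdx hdr rest false <;>
              simp [pvFindTbdIdx, h1, h2, h4a, h4b, hfind, List.append_assoc]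
        · have hstep : pvStepA hdr (x0 :: xs) (acc, ins, false) l = (acc ++ [l], ins, false) := by
            cases ins with
            | false => simp [pvStepA, h1, h2]
            | true =>
              simp [pvStepA, h1, h2]
              intro h4a
              by_contra hb
              exact h4 ⟨h4a, by simpa using hb⟩
          rw [hstep, ih]
          cases hfind : pvFindTbdIdx hdr rest ins <;>
            cases ins <;> simp [pvFindTbdIdx, h1, h2, h4, hfind, List.append_assoc]

-- ===== VERDICT (by name: the statement is the Claim_ definition above) =====
theorem update_feedback_section_spec : Claim_equal_update_feedback_section := by
  intro content hdr items _
  unfold Spec_update_feedback_section update_feedback_section update_feedback_section_alt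
  cases items with
  | nil => simp [pvStepA_nil]
  | cons x0 xs =>
    simp only [List.isEmpty_cons, Bool.false_eq_true, if_false]
    rw [pvStepA_main]
    cases hfind : pvFindTbdIdx hdr (pvSplitNL content) false <;> simp only [hfind, List.nil_append, List.append_assoc]
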